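-- pv_equiv track=rewrite | github.com/randriye/algo_academic_project | main.py | is_connexe
-- ===== SOURCE A (Python) =====
-- def dist_sq(p1, p2):
--     return (p1[0] - p2[0]) ** 2 + (p1[1] - p2[1]) ** 2
--
-- def is_connexe(l1, l2, distance):
--     """
--     Renvoie True si l1 et l2 sont connexes, False Sinon.
--     En général, on travail avec des listes triées par abs/ord croissantes/décroissantes.
--     """
--     dist2 = distance ** 2
--     if l1 == [] or l2 == []:
--         return False
--     # G1 = barycentre(key1, distance)
--     # G2 = barycentre(key2, distance)
--     for p1 in l1:
--         for p2 in l2: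
--             if dist_sq(p1, p2) <= dist2:
--                 return True
--     return False
-- ===== SOURCE B (Python) =====
-- def is_connexe(l1, l2, distance):
--     """Spatial-hash grid: bucket l2 by cells of side max(|distance|,1); each point
--     of l1 only checks the 9 neighbouring cells."""
--     if l1 == [] or l2 == []:
--         return False
--     dist2 = distance ** 2
--     c = abs(distance) if distance != 0 else 1
--     grid = {}
--     for q in l2:
--         grid.setdefault((q[0] // c, q[1] // c), []).append(q)
--     for p in l1:
--         cx, cy = p[0] // c, p[1] // c
--         for dx in (-1, 0, 1):
--             for dy in (-1, 0, 1):
--                 for q in grid.get((cx + dx, cy + dy), []):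
--                     if (p[0] - q[0]) ** 2 + (p[1] - q[1]) ** 2 <= dist2:
--                         return True
--     return False
-- ===== Notes on version B (the rewrite author's own statement) =====
-- stated objective: alternative
-- what changed: Replaces the all-pairs nested scan with a spatial hash grid: l2 is bucketed once into cells of side max(|distance|,1), and each point of l1 tests only the points in its 9 neighbouring cells.
-- outside the precondition, e.g. on is_connexe([(0, 0)], [(0, 0), (5,)], 1): A returns True, B raises IndexError
import Mathlib
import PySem

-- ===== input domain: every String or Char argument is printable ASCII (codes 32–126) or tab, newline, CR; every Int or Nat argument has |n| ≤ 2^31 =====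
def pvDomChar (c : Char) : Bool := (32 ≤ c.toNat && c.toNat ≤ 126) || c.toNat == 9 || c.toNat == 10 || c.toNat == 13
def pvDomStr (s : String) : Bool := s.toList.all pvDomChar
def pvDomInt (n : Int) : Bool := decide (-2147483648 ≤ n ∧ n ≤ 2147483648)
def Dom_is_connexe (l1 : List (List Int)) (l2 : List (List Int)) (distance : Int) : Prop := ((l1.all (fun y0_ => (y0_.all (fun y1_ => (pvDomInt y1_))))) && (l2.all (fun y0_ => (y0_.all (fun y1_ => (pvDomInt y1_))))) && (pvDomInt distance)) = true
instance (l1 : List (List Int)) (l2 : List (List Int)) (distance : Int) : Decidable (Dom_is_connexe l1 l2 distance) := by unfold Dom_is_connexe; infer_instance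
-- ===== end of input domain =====

-- B replaces A's all-pairs nested scan with a spatial hash grid (l2 bucketed once into
-- cells of side max(|distance|,1); each l1 point checks only the 9 neighbouring cells).

-- ===== PORT A =====
-- helper dist_sq of Source A (p[0]/p[1] via pyGetD: exact under Pre_, which guarantees 2 ≤ length)
def pvDistSq (p1 p2 : List Int) : Int :=
  (PySem.List.pyGetD p1 0 0 - PySem.List.pyGetD p2 0 0) ^ 2
  + (PySem.List.pyGetD p1 1 0 - PySem.List.pyGetD p2 1 0) ^ 2

def is_connexe (l1 : List (List Int)) (l2 : List (List Int)) (distance : Int) : Bool :=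
  let dist2 := distance ^ 2
  if l1 = [] ∨ l2 = [] then false
  else l1.any (fun p1 => l2.any (fun p2 => pvDistSq p1 p2 ≤ dist2))

-- ===== PORT B =====
-- cell of a point: (q[0] // c, q[1] // c)
def pvCell (c : Int) (q : List Int) : Int × Int :=
  (PySem.Int.floordiv (PySem.List.pyGetD q 0 0) c,
   PySem.Int.floordiv (PySem.List.pyGetD q 1 0) c)

def is_connexe_alt (l1 : List (List Int)) (l2 : List (List Int)) (distance : Int) : Bool :=
  if l1 = [] ∨ l2 = [] then false
  else
    let dist2 := distance ^ 2
    let c : Int := if distance ≠ 0 then |distance| else 1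
    let grid : PySem.Dict (Int × Int) (List (List Int)) :=
      l2.foldl (fun d q => d.modify (pvCell c q) [] (· ++ [q])) PySem.Dict.empty
    l1.any (fun p =>
      let cp := pvCell c p
      ([-1, 0, 1] : List Int).any (fun dx =>
        ([-1, 0, 1] : List Int).any (fun dy =>
          (grid.getD (cp.1 + dx, cp.2 + dy) []).any (fun q =>
            (PySem.List.pyGetD p 0 0 - PySem.List.pyGetD q 0 0) ^ 2
            + (PySem.List.pyGetD p 1 0 - PySem.List.pyGetD q 1 0) ^ 2 ≤ dist2))))

-- ===== PRECONDITION & SPEC =====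
-- Pre_ excludes inputs in which some point has fewer than two coordinates (unless one list is
-- empty): A raises IndexError on nearly all of them, and on the few where an early match lets A
-- return True before reaching the malformed point, B raises while bucketing l2 (see cite).
def Pre_is_connexe (l1 : List (List Int)) (l2 : List (List Int)) (distance : Int) : Prop :=
  l1 = [] ∨ l2 = [] ∨ ((∀ p ∈ l1, 2 ≤ p.length) ∧ (∀ p ∈ l2, 2 ≤ p.length))
instance (l1 : List (List Int)) (l2 : List (List Int)) (distance : Int) : Decidable (Pre_is_connexe l1 l2 distance) := by unfold Pre_is_connexe; infer_instance

def pvWitness_is_connexe : List (List Int) × List (List Int) × Int := ([[0, 0], [3, 4]], [[7, 1]], 5)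

def Spec_is_connexe (l1 : List (List Int)) (l2 : List (List Int)) (distance : Int) (out : Bool) : Prop := out = is_connexe_alt l1 l2 distance
instance (l1 : List (List Int)) (l2 : List (List Int)) (distance : Int) (out : Bool) : Decidable (Spec_is_connexe l1 l2 distance out) := by unfold Spec_is_connexe; infer_instance

-- ===== CLAIM (what is proved, stated in full; the proofs are below) =====
def Claim_equal_is_connexe : Prop := ∀ (l1 : List (List Int)) (l2 : List (List Int)) (distance : Int), Dom_is_connexe l1 l2 distance → Pre_is_connexe l1 l2 distance → Spec_is_connexe l1 l2 distance (is_connexe l1 l2 distance)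

-- ===== LEMMAS AND PROOFS =====

theorem A_iff (l1 l2 : List (List Int)) (d : Int) :
    is_connexe l1 l2 d = true ↔ ∃ p ∈ l1, ∃ q ∈ l2, pvDistSq p q ≤ d ^ 2 := by
  unfold is_connexe
  by_cases h : l1 = [] ∨ l2 = []
  · simp only [if_pos h, Bool.false_eq_true, false_iff]
    rintro ⟨p, hp, q, hq, -⟩
    rcases h with h | h <;> subst h <;> simp_all
  · simp only [if_neg h, List.any_eq_true, decide_eq_true_eq]

-- what the grid holds at key k
theorem grid_getD (l2 : List (List Int)) (c : Int) (k : Int × Int) :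
    (l2.foldl (fun d q => d.modify (pvCell c q) [] (· ++ [q]))
        (PySem.Dict.empty : PySem.Dict (Int × Int) (List (List Int)))).getD k []
      = l2.filter (fun q => pvCell c q == k) := by
  have h := PySem.Dict.getD_foldl_modify_append (l2.map (fun q => (pvCell c q, q)))
      (PySem.Dict.empty : PySem.Dict (Int × Int) (List (List Int))) k
  simp only [List.foldl_map, List.filter_map, Function.comp_def] at h
  simpa [Function.comp_def] using h

-- floor cells of nearby coordinates are neighbours
theorem floor_close {a b c : Int} (hc : 0 < c) (h : |a - b| ≤ c) :
    PySem.Int.floordiv b c - 1 ≤ PySem.Int.floordiv a c ∧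
    PySem.Int.floordiv a c ≤ PySem.Int.floordiv b c + 1 := by
  rw [PySem.Int.floordiv_eq_ediv_of_pos hc, PySem.Int.floordiv_eq_ediv_of_pos hc]
  rw [abs_le] at h
  have h2 : (b - c) / c = b / c - 1 := by
    have := Int.add_mul_ediv_right b (-1) (show c ≠ 0 by omega)
    rw [show b + -1 * c = b - c by ring] at this
    omega
  have h3 : (b + c) / c = b / c + 1 := by
    have := Int.add_mul_ediv_right b 1 (show c ≠ 0 by omega)
    rw [show b + 1 * c = b + c by ring] at this
    omega
  have h1 : (b - c) / c ≤ a / c := Int.ediv_le_ediv hc (by omega)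
  have h4 : a / c ≤ (b + c) / c := Int.ediv_le_ediv hc (by omega)
  omega

-- B = true iff some pair is within distance
theorem B_iff (l1 l2 : List (List Int)) (d : Int) :
    is_connexe_alt l1 l2 d = true ↔ ∃ p ∈ l1, ∃ q ∈ l2, pvDistSq p q ≤ d ^ 2 := by
  unfold is_connexe_alt
  by_cases h : l1 = [] ∨ l2 = []
  · rw [if_pos h]
    simp only [Bool.false_eq_true, false_iff]
    rintro ⟨p, hp, q, hq, -⟩
    rcases h with h | h <;> subst h <;> simp_all
  · rw [if_neg h]
    simp only [List.any_eq_true, grid_getD, List.mem_filter, List.mem_cons,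
      List.not_mem_nil, or_false, decide_eq_true_eq]
    set c : Int := if d ≠ 0 then |d| else 1 with hc_def
    have hc : 0 < c := by
      rw [hc_def]; split_ifs with hd
      · exact abs_pos.mpr hd
      · norm_num
    have hd2c : d ^ 2 ≤ c ^ 2 := by
      rw [hc_def]; split_ifs with hd
      · rw [sq_abs]
      · simp [show d = 0 by omega]
    constructor
    · rintro ⟨p, hp, dx, hdx, dy, hdy, q, ⟨hq2, -⟩, hle⟩
      exact ⟨p, hp, q, hq2, hle⟩
    · rintro ⟨p, hp, q, hq, hle⟩
      have hx : |PySem.List.pyGetD q 0 0 - PySem.List.pyGetD p 0 0| ≤ c := by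
        rw [abs_le]
        unfold pvDistSq at hle
        constructor <;> nlinarith [sq_nonneg (PySem.List.pyGetD p 1 0 - PySem.List.pyGetD q 1 0),
          sq_nonneg (PySem.List.pyGetD p 0 0 - PySem.List.pyGetD q 0 0)]
      have hy : |PySem.List.pyGetD q 1 0 - PySem.List.pyGetD p 1 0| ≤ c := by
        rw [abs_le]
        unfold pvDistSq at hle
        constructor <;> nlinarith [sq_nonneg (PySem.List.pyGetD p 1 0 - PySem.List.pyGetD q 1 0),
          sq_nonneg (PySem.List.pyGetD p 0 0 - PySem.List.pyGetD q 0 0)]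
      have hfx := floor_close hc hx
      have hfy := floor_close hc hy
      refine ⟨p, hp, (pvCell c q).1 - (pvCell c p).1, ?_, (pvCell c q).2 - (pvCell c p).2, ?_,
        q, ⟨hq, ?_⟩, hle⟩
      · simp only [pvCell]; omega
      · simp only [pvCell]; omega
      · have e1 : (pvCell c p).1 + ((pvCell c q).1 - (pvCell c p).1) = (pvCell c q).1 := by ring
        have e2 : (pvCell c p).2 + ((pvCell c q).2 - (pvCell c p).2) = (pvCell c q).2 := by ring
        rw [e1, e2]
        simp


-- ===== VERDICT (by name: the statement is the Claim_ definition above) =====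
theorem is_connexe_spec : Claim_equal_is_connexe := by
  intro l1 l2 d _ _
  unfold Spec_is_connexe
  rw [Bool.eq_iff_iff, A_iff, B_iff]
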